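-- pv_equiv track=rewrite | github.com/ColinSidberry/intro-to-ml-linear-alg-calc | utils/data_generators.py | create_expanded_sports_dataset
-- ===== SOURCE A (Python) =====
-- from typing import List, Tuple, Dict
--
-- def create_expanded_sports_dataset(base_tweets: List[str],
--                                  base_labels: List[int],
--                                  expansion_factor: int = 5) -> Tuple[List[str], List[int]]:
--     """
--     Create expanded dataset with variations of base tweets.
--
--     This generates more training data while maintaining the theme.
--
--     Args:
--         base_tweets: Original tweet texts
--         base_labels: Original sentiment labels
--         expansion_factor: How many variations to create per base tweet
--
--     Returns:
--         expanded_tweets: Larger list of tweet texts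
--         expanded_labels: Corresponding labels
--     """
--     # Templates for positive variations
--     positive_templates = [
--         "Go {}!",
--         "Love the {}!",
--         "{} are amazing!",
--         "Great win by {}!",
--         "{} played fantastically!",
--         "What a game by {}!",
--         "Incredible performance {}!",
--         "{} are the best!",
--         "Amazing season for {}!",
--         "Perfect game {}!"
--     ]
--
--     # Templates for negative variations
--     negative_templates = [
--         "Terrible game {}",
--         "Disappointed in {}",
--         "{} played poorly",
--         "Bad performance by {}",
--         "Awful season for {}",
--         "Can't stand {}",
--         "{} are the worst",
--         "Horrible game {}",
--         "Frustrated with {}",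
--         "Terrible coaching {}"
--     ]
--
--     team_names = ["Dolphins", "the Fins", "Miami", "the team"]
--
--     expanded_tweets = []
--     expanded_labels = []
--
--     for tweet, label in zip(base_tweets, base_labels):
--         # Include original
--         expanded_tweets.append(tweet)
--         expanded_labels.append(label)
--
--         # Generate variations
--         templates = positive_templates if label == 1 else negative_templates
--
--         for i in range(expansion_factor - 1):
--             template = templates[i % len(templates)]
--             team = team_names[i % len(team_names)]
--
--             new_tweet = template.format(team)
--             expanded_tweets.append(new_tweet)
--             expanded_labels.append(label)
--
--     return expanded_tweets, expanded_labels
-- ===== SOURCE B (Python) =====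
-- def create_expanded_sports_dataset(base_tweets, base_labels, expansion_factor=5):
--     positive_templates = [
--         "Go {}!",
--         "Love the {}!",
--         "{} are amazing!",
--         "Great win by {}!",
--         "{} played fantastically!",
--         "What a game by {}!",
--         "Incredible performance {}!",
--         "{} are the best!",
--         "Amazing season for {}!",
--         "Perfect game {}!"
--     ]
--     negative_templates = [
--         "Terrible game {}",
--         "Disappointed in {}",
--         "{} played poorly",
--         "Bad performance by {}",
--         "Awful season for {}",
--         "Can't stand {}",
--         "{} are the worst",
--         "Horrible game {}",
--         "Frustrated with {}",
--         "Terrible coaching {}"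
--     ]
--     team_names = ["Dolphins", "the Fins", "Miami", "the team"]
--
--     # Variations do not depend on the tweet: build each table once.
--     pos_variations = [positive_templates[i % len(positive_templates)].format(team_names[i % len(team_names)])
--                       for i in range(expansion_factor - 1)]
--     neg_variations = [negative_templates[i % len(negative_templates)].format(team_names[i % len(team_names)])
--                       for i in range(expansion_factor - 1)]
--
--     expanded_tweets = []
--     expanded_labels = []
--     for tweet, label in zip(base_tweets, base_labels):
--         variations = pos_variations if label == 1 else neg_variations
--         expanded_tweets.append(tweet)
--         expanded_tweets.extend(variations)
--         expanded_labels.extend([label] * (1 + len(variations)))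
--     return expanded_tweets, expanded_labels
-- ===== Notes on version B (the rewrite author's own statement) =====
-- stated objective: simpler
-- what changed: The per-tweet inner template loop is replaced by two variation tables built once before the main loop; the main loop then just appends the original tweet and extends with the precomputed table and a replicated label list.
import Mathlib
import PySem

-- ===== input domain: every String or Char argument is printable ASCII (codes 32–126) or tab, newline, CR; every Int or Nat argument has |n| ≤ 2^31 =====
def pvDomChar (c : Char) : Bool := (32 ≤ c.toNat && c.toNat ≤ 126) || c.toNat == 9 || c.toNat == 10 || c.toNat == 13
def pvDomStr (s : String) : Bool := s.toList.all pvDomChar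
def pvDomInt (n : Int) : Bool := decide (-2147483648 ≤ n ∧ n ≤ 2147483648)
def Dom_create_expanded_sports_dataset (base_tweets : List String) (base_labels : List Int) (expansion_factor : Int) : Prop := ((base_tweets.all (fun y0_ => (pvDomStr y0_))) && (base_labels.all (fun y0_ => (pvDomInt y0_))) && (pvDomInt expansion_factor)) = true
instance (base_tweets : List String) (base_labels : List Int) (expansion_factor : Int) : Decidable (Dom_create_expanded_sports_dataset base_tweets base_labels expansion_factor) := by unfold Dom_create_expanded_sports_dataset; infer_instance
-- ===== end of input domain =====

-- B hoists the tweet-independent variation tables out of the per-tweet loop: each table is built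
-- once and the main loop extends the output with it (objective: simpler; same asymptotic cost
-- dominated by output size, fewer template formats performed).

-- ===== PORT A =====
-- template.format(team): each template literal contains exactly one "{}", so str.format equals
-- replacing "{}" by the team name (exact for these constant templates).
def pvFmt (template team : String) : String := PySem.Str.replace template "{}" team

def pvPosT : List String :=
  ["Go {}!", "Love the {}!", "{} are amazing!", "Great win by {}!", "{} played fantastically!",
   "What a game by {}!", "Incredible performance {}!", "{} are the best!",
   "Amazing season for {}!", "Perfect game {}!"]

def pvNegT : List String :=
  ["Terrible game {}", "Disappointed in {}", "{} played poorly", "Bad performance by {}",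
   "Awful season for {}", "Can't stand {}", "{} are the worst", "Horrible game {}",
   "Frustrated with {}", "Terrible coaching {}"]

def pvTeams : List String := ["Dolphins", "the Fins", "Miami", "the team"]

def create_expanded_sports_dataset (base_tweets : List String) (base_labels : List Int) (expansion_factor : Int) : List String × List Int :=
  (base_tweets.zip base_labels).foldl (fun acc p =>
    let tweet := p.1
    let label := p.2
    let acc := (acc.1 ++ [tweet], acc.2 ++ [label])
    let templates := if label == 1 then pvPosT else pvNegT
    (PySem.List.pyRange 0 (expansion_factor - 1) 1).foldl (fun a i =>
      let template := PySem.List.pyGetD templates (PySem.Int.mod i (templates.length : Int)) ""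
      let team := PySem.List.pyGetD pvTeams (PySem.Int.mod i (pvTeams.length : Int)) ""
      let new_tweet := pvFmt template team
      (a.1 ++ [new_tweet], a.2 ++ [label])) acc) ([], [])

-- ===== PORT B =====
def pvVariation (templates : List String) (i : Int) : String :=
  pvFmt (PySem.List.pyGetD templates (PySem.Int.mod i (templates.length : Int)) "")
        (PySem.List.pyGetD pvTeams (PySem.Int.mod i (pvTeams.length : Int)) "")

def create_expanded_sports_dataset_alt (base_tweets : List String) (base_labels : List Int) (expansion_factor : Int) : List String × List Int :=
  let rng := PySem.List.pyRange 0 (expansion_factor - 1) 1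
  let pos_variations := rng.map (pvVariation pvPosT)
  let neg_variations := rng.map (pvVariation pvNegT)
  (base_tweets.zip base_labels).foldl (fun acc p =>
    let variations := if p.2 == 1 then pos_variations else neg_variations
    (acc.1 ++ p.1 :: variations, acc.2 ++ List.replicate (1 + variations.length) p.2)) ([], [])

-- ===== PRECONDITION & SPEC =====
def Spec_create_expanded_sports_dataset (base_tweets : List String) (base_labels : List Int) (expansion_factor : Int) (out : List String × List Int) : Prop := out = create_expanded_sports_dataset_alt base_tweets base_labels expansion_factor
instance (base_tweets : List String) (base_labels : List Int) (expansion_factor : Int) (out : List String × List Int) : Decidable (Spec_create_expanded_sports_dataset base_tweets base_labels expansion_factor out) := by unfold Spec_create_expanded_sports_dataset; infer_instance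

-- ===== CLAIM (what is proved, stated in full; the proofs are below) =====
def Claim_equal_create_expanded_sports_dataset : Prop := ∀ (base_tweets : List String) (base_labels : List Int) (expansion_factor : Int), Dom_create_expanded_sports_dataset base_tweets base_labels expansion_factor → Spec_create_expanded_sports_dataset base_tweets base_labels expansion_factor (create_expanded_sports_dataset base_tweets base_labels expansion_factor)

-- ===== LEMMAS AND PROOFS =====

-- A's inner loop: appending one formatted tweet and the label per index is a map / replicate.
theorem pv_inner_loop (f : Int → String) (label : Int) :
    ∀ (l : List Int) (acc : List String × List Int),
      l.foldl (fun a i => (a.1 ++ [f i], a.2 ++ [label])) acc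
        = (acc.1 ++ l.map f, acc.2 ++ List.replicate l.length label) := by
  intro l
  induction l with
  | nil => intro acc; simp
  | cons x xs ih =>
      intro acc
      simp [List.foldl_cons, ih, List.replicate_succ, List.append_assoc]

theorem pv_main_loop (expansion_factor : Int) :
    ∀ (ps : List (String × Int)) (acc : List String × List Int),
      ps.foldl (fun acc p =>
        let tweet := p.1
        let label := p.2
        let acc := (acc.1 ++ [tweet], acc.2 ++ [label])
        let templates := if label == 1 then pvPosT else pvNegT
        (PySem.List.pyRange 0 (expansion_factor - 1) 1).foldl (fun a i =>
          let template := PySem.List.pyGetD templates (PySem.Int.mod i (templates.length : Int)) ""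
          let team := PySem.List.pyGetD pvTeams (PySem.Int.mod i (pvTeams.length : Int)) ""
          let new_tweet := pvFmt template team
          (a.1 ++ [new_tweet], a.2 ++ [label])) acc) acc
      = ps.foldl (fun acc p =>
          let variations := if p.2 == 1 then (PySem.List.pyRange 0 (expansion_factor - 1) 1).map (pvVariation pvPosT)
                            else (PySem.List.pyRange 0 (expansion_factor - 1) 1).map (pvVariation pvNegT)
          (acc.1 ++ p.1 :: variations, acc.2 ++ List.replicate (1 + variations.length) p.2)) acc := by
  intro ps
  induction ps with
  | nil => intro acc; rfl
  | cons p ps ih =>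
      intro acc
      simp only [List.foldl_cons]
      rw [ih]
      congr 1
      by_cases h : p.2 == 1
      · simp only [if_pos h]
        rw [show ((fun a i => (a.1 ++ [pvFmt (PySem.List.pyGetD pvPosT (PySem.Int.mod i (pvPosT.length : Int)) "") (PySem.List.pyGetD pvTeams (PySem.Int.mod i (pvTeams.length : Int)) "")], a.2 ++ [p.2])) : List String × List Int → Int → List String × List Int) = (fun a i => (a.1 ++ [pvVariation pvPosT i], a.2 ++ [p.2])) from rfl]
        simp [pv_inner_loop (pvVariation pvPosT) p.2, List.replicate_succ, Nat.one_add, List.append_assoc]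
      · simp only [if_neg h]
        rw [show ((fun a i => (a.1 ++ [pvFmt (PySem.List.pyGetD pvNegT (PySem.Int.mod i (pvNegT.length : Int)) "") (PySem.List.pyGetD pvTeams (PySem.Int.mod i (pvTeams.length : Int)) "")], a.2 ++ [p.2])) : List String × List Int → Int → List String × List Int) = (fun a i => (a.1 ++ [pvVariation pvNegT i], a.2 ++ [p.2])) from rfl]
        simp [pv_inner_loop (pvVariation pvNegT) p.2, List.replicate_succ, Nat.one_add, List.append_assoc]

-- ===== VERDICT (by name: the statement is the Claim_ definition above) =====
theorem create_expanded_sports_dataset_spec : Claim_equal_create_expanded_sports_dataset := by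
  intro base_tweets base_labels expansion_factor _
  unfold Spec_create_expanded_sports_dataset create_expanded_sports_dataset create_expanded_sports_dataset_alt
  exact pv_main_loop expansion_factor (base_tweets.zip base_labels) ([], [])
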